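-- pv_equiv track=rewrite | github.com/alexanderswerdlow/unidisc | unidisc/utils/cuda_utils.py | _get_min_max_indices
-- ===== SOURCE A (Python) =====
-- def _get_min_max_indices(input_list):
--     min_index = -1
--     max_index = -1
--     min_value = float("inf")
--     max_value = float("-inf")
--     for rank, curr_value in enumerate(input_list):
--         if curr_value < min_value:
--             min_value = curr_value
--             min_index = rank
--         if curr_value > max_value:
--             max_value = curr_value
--             max_index = rank
--
--     return min_index, max_index
-- ===== SOURCE B (Python) =====
-- def _get_min_max_indices(input_list):
--     if not input_list:
--         return (-1, -1)
--     min_value = min(input_list)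
--     max_value = max(input_list)
--     return (input_list.index(min_value), input_list.index(max_value))
-- ===== Notes on version B (the rewrite author's own statement) =====
-- stated objective: idiomatic
-- what changed: Replaces the single manual loop that tracks indices and running extrema with value-finding passes min()/max() followed by first-occurrence .index() lookups, plus an explicit empty-list guard returning A's sentinel pair.
import Mathlib
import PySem

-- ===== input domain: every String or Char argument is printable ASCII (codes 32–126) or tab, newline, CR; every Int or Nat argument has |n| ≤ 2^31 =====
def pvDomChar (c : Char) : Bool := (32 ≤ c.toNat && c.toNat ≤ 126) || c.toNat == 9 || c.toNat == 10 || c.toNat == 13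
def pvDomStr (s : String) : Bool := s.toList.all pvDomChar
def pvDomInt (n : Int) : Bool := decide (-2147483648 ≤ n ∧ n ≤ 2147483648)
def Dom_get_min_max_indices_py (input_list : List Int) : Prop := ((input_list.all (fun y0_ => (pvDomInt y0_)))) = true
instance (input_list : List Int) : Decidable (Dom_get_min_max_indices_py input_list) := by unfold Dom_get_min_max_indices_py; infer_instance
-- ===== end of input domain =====

-- B replaces A's single index-tracking loop with min()/max() passes followed by
-- first-occurrence .index() lookups (idiomatic; same O(n) cost).

-- ===== PORT A =====
-- float("inf") / float("-inf") are modelled as Option Int sentinels (none = ±infinity):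
-- exact here, since every element compared against them is an Int.
-- loop body of A: first the min update, then the max update, over (rank, curr_value)
def pvStepA (s : Int × Int × Option Int × Option Int) (p : Int × Int) :
    Int × Int × Option Int × Option Int :=
  let mi := s.1; let ma := s.2.1; let mv := s.2.2.1; let xv := s.2.2.2
  let (mi, mv) :=
    if (match mv with | none => true | some v => decide (p.2 < v)) then (p.1, some p.2)
    else (mi, mv)
  let (ma, xv) :=
    if (match xv with | none => true | some v => decide (p.2 > v)) then (p.1, some p.2)
    else (ma, xv)
  (mi, ma, mv, xv)

def get_min_max_indices_py (input_list : List Int) : Int × Int :=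
  let st := (PySem.List.enumerate input_list).foldl pvStepA (-1, -1, none, none)
  (st.1, st.2.1)

-- ===== PORT B =====
def get_min_max_indices_py_alt (input_list : List Int) : Int × Int :=
  match input_list with
  | [] => (-1, -1)
  | _ :: _ =>
    match PySem.List.min? input_list (fun y => y), PySem.List.max? input_list (fun y => y) with
    | some mn, some mx =>
      (((PySem.List.index? input_list mn).getD 0 : Nat),
       ((PySem.List.index? input_list mx).getD 0 : Nat))
    | _, _ => (-1, -1)  -- unreachable: min?/max? of a nonempty list are some

-- ===== PRECONDITION & SPEC =====
def Spec_get_min_max_indices_py (input_list : List Int) (out : Int × Int) : Prop := out = get_min_max_indices_py_alt input_list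
instance (input_list : List Int) (out : Int × Int) : Decidable (Spec_get_min_max_indices_py input_list out) := by unfold Spec_get_min_max_indices_py; infer_instance

-- ===== CLAIM (what is proved, stated in full; the proofs are below) =====
def Claim_equal_get_min_max_indices_py : Prop := ∀ (input_list : List Int), Dom_get_min_max_indices_py input_list → Spec_get_min_max_indices_py input_list (get_min_max_indices_py input_list)

-- ===== LEMMAS AND PROOFS =====

-- spec helpers: the value and first index of the minimum / maximum of a nonempty list
def pvMin (xs : List Int) : Int := match xs with | [] => 0 | x :: t => t.foldl min x
def pvMax (xs : List Int) : Int := match xs with | [] => 0 | x :: t => t.foldl max x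
def pvIMin (xs : List Int) : Int := ((PySem.List.index? xs (pvMin xs)).getD 0 : Nat)
def pvIMax (xs : List Int) : Int := ((PySem.List.index? xs (pvMax xs)).getD 0 : Nat)

lemma min?_eq_pvMin (x : Int) (t : List Int) :
    PySem.List.min? (x :: t) (fun y => y) = some (pvMin (x :: t)) := by
  simpa [pvMin] using PySem.List.min?_id_cons (x := x) (t := t)

lemma max?_eq_pvMax (x : Int) (t : List Int) :
    PySem.List.max? (x :: t) (fun y => y) = some (pvMax (x :: t)) := by
  simpa [pvMax] using PySem.List.max?_id_cons (x := x) (t := t)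

lemma pvMin_mem (xs : List Int) (h : xs ≠ []) : pvMin xs ∈ xs := by
  obtain ⟨x, t, rfl⟩ := List.exists_cons_of_ne_nil h
  exact PySem.List.min?_mem (min?_eq_pvMin x t)

lemma pvMax_mem (xs : List Int) (h : xs ≠ []) : pvMax xs ∈ xs := by
  obtain ⟨x, t, rfl⟩ := List.exists_cons_of_ne_nil h
  exact PySem.List.max?_mem (max?_eq_pvMax x t)

lemma pvMin_le (xs : List Int) (h : xs ≠ []) : ∀ y ∈ xs, pvMin xs ≤ y := by
  obtain ⟨x, t, rfl⟩ := List.exists_cons_of_ne_nil h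
  exact PySem.List.min?_isMin (min?_eq_pvMin x t)

lemma le_pvMax (xs : List Int) (h : xs ≠ []) : ∀ y ∈ xs, y ≤ pvMax xs := by
  obtain ⟨x, t, rfl⟩ := List.exists_cons_of_ne_nil h
  exact PySem.List.max?_isMax (max?_eq_pvMax x t)

lemma pvMin_append (xs : List Int) (c : Int) (h : xs ≠ []) :
    pvMin (xs ++ [c]) = min (pvMin xs) c := by
  obtain ⟨x, t, rfl⟩ := List.exists_cons_of_ne_nil h
  simp [pvMin, List.foldl_append]

lemma pvMax_append (xs : List Int) (c : Int) (h : xs ≠ []) :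
    pvMax (xs ++ [c]) = max (pvMax xs) c := by
  obtain ⟨x, t, rfl⟩ := List.exists_cons_of_ne_nil h
  simp [pvMax, List.foldl_append]

-- loop invariant for A's fold
lemma foldA_eq (xs : List Int) (h : xs ≠ []) :
    (PySem.List.enumerate xs).foldl pvStepA (-1, -1, none, none)
      = (pvIMin xs, pvIMax xs, some (pvMin xs), some (pvMax xs)) := by
  induction xs using List.reverseRecOn with
  | nil => exact absurd rfl h
  | append_singleton xs c ih =>
    rcases eq_or_ne xs [] with rfl | hxs
    · simp [PySem.List.enumerate_cons, pvStepA, pvIMin, pvIMax, pvMin, pvMax,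
        PySem.List.index?_eq_idxOf?]
    · rw [PySem.List.enumerate_append, List.foldl_append, ih hxs]
      simp only [PySem.List.enumerate_cons, PySem.List.enumerate_nil, List.foldl_cons,
        List.foldl_nil]
      have hminA := pvMin_append xs c hxs
      have hmaxA := pvMax_append xs c hxs
      have himin : pvIMin (xs ++ [c]) =
          (if c < pvMin xs then (xs.length : Int) else pvIMin xs) := by
        split_ifs with hc
        · have hnot : c ∉ xs := fun hmem => absurd (pvMin_le xs hxs c hmem) (by omega)
          have hv : pvMin (xs ++ [c]) = c := by rw [hminA]; omega
          unfold pvIMin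
          rw [hv, PySem.List.index?_append_singleton_self _ _ hnot]
          simp
        · have hv : pvMin (xs ++ [c]) = pvMin xs := by rw [hminA]; omega
          unfold pvIMin
          rw [hv, PySem.List.index?_append_of_mem _ (pvMin_mem xs hxs)]
      have himax : pvIMax (xs ++ [c]) =
          (if c > pvMax xs then (xs.length : Int) else pvIMax xs) := by
        split_ifs with hc
        · have hnot : c ∉ xs := fun hmem => absurd (le_pvMax xs hxs c hmem) (by omega)
          have hv : pvMax (xs ++ [c]) = c := by rw [hmaxA]; omega
          unfold pvIMax
          rw [hv, PySem.List.index?_append_singleton_self _ _ hnot]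
          simp
        · have hv : pvMax (xs ++ [c]) = pvMax xs := by rw [hmaxA]; omega
          unfold pvIMax
          rw [hv, PySem.List.index?_append_of_mem _ (pvMax_mem xs hxs)]
      simp only [pvStepA, himin, himax, hminA, hmaxA]
      split_ifs with h1 h2 h2 <;> simp_all <;> omega

-- ===== VERDICT (by name: the statement is the Claim_ definition above) =====
theorem get_min_max_indices_py_spec : Claim_equal_get_min_max_indices_py := by
  intro xs _
  unfold Spec_get_min_max_indices_py get_min_max_indices_py get_min_max_indices_py_alt
  cases xs with
  | nil => simp [PySem.List.enumerate_nil]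
  | cons x t =>
    rw [foldA_eq (x :: t) (by simp), min?_eq_pvMin, max?_eq_pvMax]
    simp [pvIMin, pvIMax]
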